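-- pv_equiv track=rewrite | github.com/viniciusazeved/chuva-vazao | chuva_vazao/hietograma.py | _posicoes_blocos_alternados
-- ===== SOURCE A (Python) =====
-- def _posicoes_blocos_alternados(n: int) -> list[int]:
--     """Indices [centro, centro-1, centro+1, centro-2, centro+2, ...]."""
--     centro = n // 2
--     posicoes = [centro]
--     direcao = 1
--     passo = 1
--     while len(posicoes) < n:
--         prox = centro + direcao * passo
--         if 0 <= prox < n:
--             posicoes.append(prox)
--         if direcao == 1:
--             direcao = -1
--         else:
--             direcao = 1
--             passo += 1
--     return posicoes[:n]
-- ===== SOURCE B (Python) =====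
-- def _posicoes_blocos_alternados(n: int) -> list[int]:
--     """Indices ordered by distance from the center, the + side first at each distance."""
--     centro = n // 2
--     return sorted(range(n), key=lambda i: 2 * abs(i - centro) + (i < centro))
-- ===== Notes on version B (the rewrite author's own statement) =====
-- stated objective: simpler
-- what changed: Replaces A's stateful while loop (direction flag, step counter, bounds checks, final slice) with a one-line sort of range(n) by the key 2*|i-centro| + (i < centro), which encodes distance from the center with the + side first.
import Mathlib
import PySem

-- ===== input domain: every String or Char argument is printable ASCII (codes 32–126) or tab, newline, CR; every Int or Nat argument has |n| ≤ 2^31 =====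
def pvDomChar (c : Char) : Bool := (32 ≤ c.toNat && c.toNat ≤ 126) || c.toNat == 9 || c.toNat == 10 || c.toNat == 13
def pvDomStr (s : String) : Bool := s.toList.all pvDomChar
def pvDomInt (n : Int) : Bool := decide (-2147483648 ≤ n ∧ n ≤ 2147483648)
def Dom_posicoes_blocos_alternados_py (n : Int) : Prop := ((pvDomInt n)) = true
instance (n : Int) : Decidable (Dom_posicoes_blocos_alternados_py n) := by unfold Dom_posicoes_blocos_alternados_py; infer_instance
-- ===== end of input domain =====

-- B replaces A's stateful while loop with a one-line sort of range(n) by the key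
-- 2*|i-centro| + (i < centro) (objective: simpler; return values proved identical for all n).

-- ===== PORT A =====
-- the while loop, one fuel step per iteration; fuel 2*n.toNat always suffices
-- (proved below: the loop ends once len(posicoes) = n, reached within 2*n iterations)
def pvLoopA (n centro : Int) (posicoes : List Int) (direcao passo : Int) (fuel : Nat) : List Int :=
  match fuel with
  | 0 => posicoes
  | fuel + 1 =>
    if (posicoes.length : Int) < n then
      let prox := centro + direcao * passo
      let posicoes' := if 0 ≤ prox ∧ prox < n then posicoes ++ [prox] else posicoes
      if direcao = 1 then pvLoopA n centro posicoes' (-1) passo fuel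
      else pvLoopA n centro posicoes' 1 (passo + 1) fuel
    else posicoes

def posicoes_blocos_alternados_py (n : Int) : List Int :=
  let centro := PySem.Int.floordiv n 2
  PySem.List.slice (pvLoopA n centro [centro] 1 1 (2 * n.toNat)) none (some n)

-- ===== PORT B =====
-- Source B's sort key, 2*abs(i-centro) + (i < centro), the Python bool counting as 0/1
def pvKey (centro i : Int) : Int := 2 * |i - centro| + (if i < centro then 1 else 0)

def posicoes_blocos_alternados_py_alt (n : Int) : List Int :=
  let centro := PySem.Int.floordiv n 2
  PySem.List.sorted (PySem.List.pyRange 0 n 1) (pvKey centro) false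

-- ===== PRECONDITION & SPEC =====
def Spec_posicoes_blocos_alternados_py (n : Int) (out : List Int) : Prop := out = posicoes_blocos_alternados_py_alt n
instance (n : Int) (out : List Int) : Decidable (Spec_posicoes_blocos_alternados_py n out) := by unfold Spec_posicoes_blocos_alternados_py; infer_instance

-- ===== CLAIM (what is proved, stated in full; the proofs are below) =====
def Claim_equal_posicoes_blocos_alternados_py : Prop := ∀ (n : Int), Dom_posicoes_blocos_alternados_py n → Spec_posicoes_blocos_alternados_py n (posicoes_blocos_alternados_py n)

-- ===== LEMMAS AND PROOFS =====

-- the common shape: the elements appended at distances p, p+1, …, p+k-1, '+' side first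
def pvBlocks (n c : Int) (p : Int) : Nat → List Int
  | 0 => []
  | k + 1 =>
    ((if 0 ≤ c + p ∧ c + p < n then [c + p] else []) ++
     (if 0 ≤ c - p ∧ c - p < n then [c - p] else [])) ++ pvBlocks n c (p + 1) k

lemma mem_pvBlocks (n c : Int) : ∀ (k : Nat) (p x : Int),
    (x ∈ pvBlocks n c p k ↔
      0 ≤ x ∧ x < n ∧ ((p ≤ x - c ∧ x - c < p + k) ∨ (p ≤ c - x ∧ c - x < p + k))) := by
  intro k
  induction k with
  | zero => intro p x; simp [pvBlocks]
  | succ k ih =>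
    intro p x
    rw [pvBlocks]
    simp only [List.mem_append, ih (p + 1) x]
    split_ifs with h1 h2 h2 <;>
      simp only [List.mem_singleton, List.not_mem_nil, false_or, or_false] <;>
      try omega

lemma key_lb_pvBlocks (n c : Int) : ∀ (k : Nat) (p x : Int), 1 ≤ p →
    x ∈ pvBlocks n c p k → 2 * p ≤ pvKey c x := by
  intro k p x hp hx
  rw [mem_pvBlocks] at hx
  unfold pvKey
  rcases abs_cases (x - c) with ⟨h1, h2⟩ | ⟨h1, h2⟩ <;> split_ifs <;> omega

lemma pairwise_pvBlocks (n c : Int) : ∀ (k : Nat) (p : Int), 1 ≤ p →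
    (pvBlocks n c p k).Pairwise (fun a b => pvKey c a < pvKey c b) := by
  intro k
  induction k with
  | zero => intro p _; simp [pvBlocks]
  | succ k ih =>
    intro p hp
    have hplus : pvKey c (c + p) = 2 * p := by
      unfold pvKey
      rcases abs_cases (c + p - c) with ⟨h1, h2⟩ | ⟨h1, h2⟩ <;> split_ifs <;> omega
    have hminus : pvKey c (c - p) = 2 * p + 1 := by
      unfold pvKey
      rcases abs_cases (c - p - c) with ⟨h1, h2⟩ | ⟨h1, h2⟩ <;> split_ifs <;> omega
    have hrest : ∀ x ∈ pvBlocks n c (p + 1) k, 2 * (p + 1) ≤ pvKey c x :=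
      fun x hx => key_lb_pvBlocks n c k (p + 1) x (by omega) hx
    rw [pvBlocks, List.pairwise_append]
    refine ⟨?_, ih (p + 1) (by omega), ?_⟩
    · split_ifs <;> simp [hplus, hminus]
    · intro a ha b hb
      have hb' := hrest b hb
      have : a = c + p ∨ a = c - p := by
        rcases List.mem_append.mp ha with h | h <;> split_ifs at h <;> simp at h <;> tauto
      rcases this with rfl | rfl <;> omega

lemma nodup_pvBlocks (n c : Int) (k : Nat) (p : Int) (hp : 1 ≤ p) :
    (pvBlocks n c p k).Nodup :=
  (pairwise_pvBlocks n c k p hp).imp (fun h => by intro he; subst he; omega)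

-- the full target list for n ≥ 1, with c = n // 2
def pvTarget (n c : Int) : List Int := c :: pvBlocks n c 1 n.toNat

lemma centro_bounds (n : Int) (hn : 1 ≤ n) :
    0 ≤ PySem.Int.floordiv n 2 ∧ PySem.Int.floordiv n 2 < n := by
  rw [PySem.Int.floordiv_eq_ediv_of_pos (by omega)]
  omega

lemma perm_pvTarget (n c : Int) (hn : 1 ≤ n) (hc0 : 0 ≤ c) (hcn : c < n) :
    (pvTarget n c).Perm (PySem.List.pyRange 0 n 1) := by
  have hnn : n = (n.toNat : Int) := by omega
  have hnodupR : (PySem.List.pyRange 0 n 1).Nodup := by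
    rw [hnn, PySem.List.pyRange_zero_natCast]
    exact (List.nodup_range).map (fun a b => by omega)
  have hnodupT : (pvTarget n c).Nodup := by
    rw [pvTarget, List.nodup_cons]
    refine ⟨?_, nodup_pvBlocks n c n.toNat 1 le_rfl⟩
    rw [mem_pvBlocks]; omega
  rw [List.perm_ext_iff_of_nodup hnodupT hnodupR]
  intro x
  rw [pvTarget, List.mem_cons, mem_pvBlocks, PySem.List.mem_pyRange_one]
  omega

lemma length_pvTarget (n c : Int) (hn : 1 ≤ n) (hc0 : 0 ≤ c) (hcn : c < n) :
    (pvTarget n c).length = n.toNat := by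
  rw [(perm_pvTarget n c hn hc0 hcn).length_eq]
  have hnn : n = (n.toNat : Int) := by omega
  rw [hnn, PySem.List.pyRange_zero_natCast, List.length_map, List.length_range]
  omega

-- B equals the target
lemma alt_eq_target (n : Int) (hn : 1 ≤ n) :
    posicoes_blocos_alternados_py_alt n = pvTarget n (PySem.Int.floordiv n 2) := by
  obtain ⟨hc0, hcn⟩ := centro_bounds n hn
  show PySem.List.sorted (PySem.List.pyRange 0 n 1) (pvKey (PySem.Int.floordiv n 2)) false =
    pvTarget n (PySem.Int.floordiv n 2)
  revert hc0 hcn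
  generalize PySem.Int.floordiv n 2 = c
  intro hc0 hcn
  apply PySem.List.sorted_eq_of_perm_of_pairwise_lt
  · exact perm_pvTarget n c hn hc0 hcn
  · rw [pvTarget, List.pairwise_cons]
    refine ⟨?_, pairwise_pvBlocks n c n.toNat 1 le_rfl⟩
    intro x hx
    have h2 := key_lb_pvBlocks n c n.toNat 1 x le_rfl hx
    have hkc : pvKey c c = 0 := by
      unfold pvKey
      rcases abs_cases (c - c) with ⟨h1, _⟩ | ⟨h1, _⟩ <;> split_ifs <;> omega
    omega

-- A's loop equals pos ++ blocks whenever the remaining blocks account exactly for the missing length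
lemma loopA_eq (n c : Int) : ∀ (k : Nat) (p : Int) (pos : List Int), 1 ≤ p →
    pos.length + (pvBlocks n c p k).length = n.toNat →
    pvLoopA n c pos 1 p (2 * k) = pos ++ pvBlocks n c p k := by
  intro k
  induction k with
  | zero =>
    intro p pos hp hlen
    simp [pvLoopA, pvBlocks]
  | succ k ih =>
    intro p pos hp hlen
    have hfuel : 2 * (k + 1) = (2 * k + 1) + 1 := by omega
    rw [hfuel, pvLoopA]
    by_cases hcond : (pos.length : Int) < n
    · simp only [if_pos hcond, one_mul, reduceIte]
      by_cases hin1 : 0 ≤ c + p ∧ c + p < n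
      · -- '+' side appended
        rw [if_pos hin1, pvLoopA]
        have hL1 : 1 ≤ (pvBlocks n c p (k + 1)).length :=
          List.length_pos_of_mem ((mem_pvBlocks n c (k + 1) p (c + p)).mpr
            ⟨hin1.1, hin1.2, Or.inl ⟨by omega, by omega⟩⟩)
        by_cases hcond2 : ((pos ++ [c + p]).length : Int) < n
        · simp only [if_pos hcond2, neg_one_mul,
            if_neg (by norm_num : ¬ (-1 : Int) = 1)]
          have heq : c + -p = c - p := by ring
          rw [heq]
          by_cases hin2 : 0 ≤ c - p ∧ c - p < n
          · rw [if_pos hin2, ih (p + 1) (pos ++ [c + p] ++ [c - p]) (by omega) ?hl]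
            · rw [pvBlocks, if_pos hin1, if_pos hin2]
              simp
            case hl =>
              rw [pvBlocks, if_pos hin1, if_pos hin2] at hlen
              simp only [List.length_append, List.length_cons, List.length_nil] at hlen ⊢
              omega
          · rw [if_neg hin2, ih (p + 1) (pos ++ [c + p]) (by omega) ?hl]
            · rw [pvBlocks, if_pos hin1, if_neg hin2]
              simp
            case hl =>
              rw [pvBlocks, if_pos hin1, if_neg hin2] at hlen
              simp only [List.length_append, List.length_cons, List.length_nil,
                List.append_nil] at hlen ⊢
              omega
        · -- length reached n right after appending c + p: the remaining blocks are empty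
          simp only [if_neg hcond2]
          simp only [List.length_append, List.length_singleton] at hcond2
          have hrest : (pvBlocks n c p (k + 1)).length = 1 := by omega
          have h2 : ¬ (0 ≤ c - p ∧ c - p < n) := by
            intro hin2
            rw [pvBlocks, if_pos hin1, if_pos hin2] at hrest
            simp at hrest
          have h3 : pvBlocks n c (p + 1) k = [] := by
            rw [pvBlocks, if_pos hin1, if_neg h2] at hrest
            simp at hrest
            exact hrest
          rw [pvBlocks, if_pos hin1, if_neg h2, h3]
          simp
      · -- '+' side out of range: nothing appended this iteration
        rw [if_neg hin1, pvLoopA]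
        simp only [if_pos hcond, neg_one_mul,
          if_neg (by norm_num : ¬ (-1 : Int) = 1)]
        have heq : c + -p = c - p := by ring
        rw [heq]
        by_cases hin2 : 0 ≤ c - p ∧ c - p < n
        · rw [if_pos hin2, ih (p + 1) (pos ++ [c - p]) (by omega) ?hl]
          · rw [pvBlocks, if_neg hin1, if_pos hin2]
            simp
          case hl =>
            rw [pvBlocks, if_neg hin1, if_pos hin2] at hlen
            simp only [List.length_append, List.length_cons, List.length_nil,
              List.nil_append] at hlen ⊢
            omega
        · rw [if_neg hin2, ih (p + 1) pos (by omega) ?hl]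
          · rw [pvBlocks, if_neg hin1, if_neg hin2]
            simp
          case hl =>
            rw [pvBlocks, if_neg hin1, if_neg hin2] at hlen
            simp only [List.length_append, List.length_nil] at hlen ⊢
            omega
    · -- loop condition already false: pos has full length, blocks must be empty
      simp only [if_neg hcond]
      have h0 : (pvBlocks n c p (k + 1)).length = 0 := by omega
      rw [List.eq_nil_of_length_eq_zero h0, List.append_nil]

lemma a_eq_target (n : Int) (hn : 1 ≤ n) :
    posicoes_blocos_alternados_py n = pvTarget n (PySem.Int.floordiv n 2) := by
  obtain ⟨hc0, hcn⟩ := centro_bounds n hn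
  show PySem.List.slice (pvLoopA n (PySem.Int.floordiv n 2) [PySem.Int.floordiv n 2] 1 1
    (2 * n.toNat)) none (some n) = pvTarget n (PySem.Int.floordiv n 2)
  revert hc0 hcn
  generalize PySem.Int.floordiv n 2 = c
  intro hc0 hcn
  have hnn : n = (n.toNat : Int) := by omega
  have hlen : (1 : Nat) + (pvBlocks n c 1 n.toNat).length = n.toNat := by
    have h := length_pvTarget n c hn hc0 hcn
    rw [pvTarget] at h
    simp only [List.length_cons] at h
    omega
  have hloop : pvLoopA n c [c] 1 1 (2 * n.toNat) = [c] ++ pvBlocks n c 1 n.toNat :=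
    loopA_eq n c n.toNat 1 [c] le_rfl (by simp only [List.length_singleton]; omega)
  rw [hloop]
  have hsl : ∀ (xs : List Int), xs.length = n.toNat →
      PySem.List.slice xs none (some n) = xs := by
    intro xs hl
    rw [show (some n : Option Int) = some ((n.toNat : Nat) : Int) from by rw [← hnn],
      PySem.List.slice_to_natCast, ← hl, List.take_length]
  rw [hsl ([c] ++ pvBlocks n c 1 n.toNat)
    (by simp only [List.length_append, List.length_singleton]; omega)]
  rw [pvTarget]
  simp

-- ===== VERDICT (by name: the statement is the Claim_ definition above) =====
theorem posicoes_blocos_alternados_py_spec : Claim_equal_posicoes_blocos_alternados_py := by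
  intro n _
  show posicoes_blocos_alternados_py n = posicoes_blocos_alternados_py_alt n
  by_cases hn : 1 ≤ n
  · rw [a_eq_target n hn, alt_eq_target n hn]
  · -- n ≤ 0: the loop gets no fuel/never appends, the slice [:n] is empty; B sorts the empty range
    have h1 : PySem.List.pyRange 0 n 1 = [] := by
      have h : ∀ x, x ∉ PySem.List.pyRange 0 n 1 := by
        intro x hx
        rw [PySem.List.mem_pyRange_one] at hx
        omega
      exact List.eq_nil_iff_forall_not_mem.mpr h
    have h2 : n.toNat = 0 := by omega
    show PySem.List.slice (pvLoopA n _ [_] 1 1 (2 * n.toNat)) none (some n) =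
      PySem.List.sorted (PySem.List.pyRange 0 n 1) _ false
    rw [h1, h2]
    simp only [pvLoopA]
    rw [show PySem.List.sorted ([] : List Int) (pvKey (PySem.Int.floordiv n 2)) false = [] from rfl]
    simp only [PySem.List.slice, PySem.List.clampIdx]
    split_ifs <;> simp <;> omega
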